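-- pv_equiv track=rewrite | github.com/EquilibriaW/Interpolated_Diffusion | scripts/datasets/didemo/download_videos_hf.py | _group_parts
-- ===== SOURCE A (Python) =====
-- from typing import Dict, List
--
-- def _group_parts(part_paths: List[str]) -> Dict[str, List[str]]:
--     groups: Dict[str, List[str]] = {}
--     for path in part_paths:
--         base = path.rsplit(".part-", 1)[0]
--         groups.setdefault(base, []).append(path)
--     for base, parts in groups.items():
--         parts.sort()
--         groups[base] = parts
--     return groups
-- ===== SOURCE B (Python) =====
-- def _group_parts(part_paths):
--     bases = list(dict.fromkeys(p.rsplit(".part-", 1)[0] for p in part_paths))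
--     groups = {b: [] for b in bases}
--     for p in sorted(part_paths):
--         groups[p.rsplit(".part-", 1)[0]].append(p)
--     return groups
-- ===== Notes on version B (the rewrite author's own statement) =====
-- stated objective: alternative
-- what changed: B sorts the whole input once and groups in a single pass into a dict whose keys are pre-seeded in first-appearance order, instead of A's group-first-then-sort-each-group-in-place two-phase loop.
import Mathlib
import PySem

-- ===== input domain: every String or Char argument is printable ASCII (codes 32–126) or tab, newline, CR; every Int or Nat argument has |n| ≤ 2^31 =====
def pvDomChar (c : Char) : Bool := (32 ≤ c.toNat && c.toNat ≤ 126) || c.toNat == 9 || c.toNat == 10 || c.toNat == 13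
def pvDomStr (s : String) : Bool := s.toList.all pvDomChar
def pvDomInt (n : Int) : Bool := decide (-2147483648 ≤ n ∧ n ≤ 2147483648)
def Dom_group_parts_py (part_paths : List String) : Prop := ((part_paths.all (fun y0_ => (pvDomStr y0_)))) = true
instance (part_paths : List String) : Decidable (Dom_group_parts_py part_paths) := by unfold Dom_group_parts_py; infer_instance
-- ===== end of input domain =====

-- B sorts the whole input once and groups in a single pass over keys seeded in first-appearance
-- order, instead of A's group-then-sort-each-group (objective: alternative decomposition).

-- ===== PORT A =====
-- shared helper: path.rsplit(".part-", 1)[0].  PySem has no rsplit; rsplit(sep, 1)[0] is exactly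
-- the prefix before the LAST occurrence of sep (the whole string if absent) — exact via Str.rfind.
def pyBase (s : String) : String :=
  let r := PySem.Str.rfind s ".part-"
  if r = -1 then s else String.ofList (s.toList.take r.toNat)

def group_parts_py (part_paths : List String) : List (String × List String) :=
  -- first loop: groups.setdefault(base, []).append(path)  (= d[base] = d.get(base, []) + [path])
  let groups := part_paths.foldl
    (fun d path => d.modify (pyBase path) ([] : List String) (fun ps => ps ++ [path]))
    (PySem.Dict.empty : PySem.Dict String (List String))
  -- second loop: each value list is sorted in place (reassignment groups[base] = parts is a no-op)
  (groups.items.map (fun bp => (bp.1, PySem.List.sorted bp.2 (fun x => x) false)))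

-- ===== PORT B =====
def group_parts_py_alt (part_paths : List String) : List (String × List String) :=
  -- bases = list(dict.fromkeys(base(p) for p in part_paths))
  let bases := PySem.List.dedup (part_paths.map pyBase)
  -- groups = {b: [] for b in bases}
  let groups0 := bases.foldl
    (fun d b => d.insert b ([] : List String))
    (PySem.Dict.empty : PySem.Dict String (List String))
  -- for p in sorted(part_paths): groups[base(p)].append(p)
  -- (the key is always present, so the [] lookup never raises; modify with default [] is exact here)
  let groups := (PySem.List.sorted part_paths (fun x => x) false).foldl
    (fun d p => d.modify (pyBase p) ([] : List String) (fun ps => ps ++ [p]))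
    groups0
  groups.items

-- ===== PRECONDITION & SPEC =====
def Spec_group_parts_py (part_paths : List String) (out : List (String × List String)) : Prop := out = group_parts_py_alt part_paths
instance (part_paths : List String) (out : List (String × List String)) : Decidable (Spec_group_parts_py part_paths out) := by unfold Spec_group_parts_py; infer_instance

-- ===== CLAIM (what is proved, stated in full; the proofs are below) =====
def Claim_equal_group_parts_py : Prop := ∀ (part_paths : List String), Dom_group_parts_py part_paths → Spec_group_parts_py part_paths (group_parts_py part_paths)

-- ===== LEMMAS AND PROOFS =====

-- the grouping fold: value at b is the old value extended by the matching inputs, in order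
theorem getD_group_fold (l : List String) (d : PySem.Dict String (List String)) (b : String) :
    (l.foldl (fun d p => d.modify (pyBase p) ([] : List String) (fun ps => ps ++ [p])) d).getD b []
      = d.getD b [] ++ l.filter (fun p => pyBase p == b) := by
  induction l generalizing d with
  | nil => simp
  | cons p l ih =>
    simp only [List.foldl_cons, List.filter_cons]
    rw [ih, PySem.Dict.getD_modify]
    by_cases h : b = pyBase p
    · simp [h]
    · have h' : ¬ pyBase p = b := fun e => h e.symm
      simp [h, h']

-- seeding the dict with empty lists: every value read back is []
theorem getD_seed_fold (L : List String) (d : PySem.Dict String (List String)) (b : String) :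
    (L.foldl (fun d k => d.insert k ([] : List String)) d).getD b []
      = if b ∈ L then [] else d.getD b [] := by
  induction L generalizing d with
  | nil => simp
  | cons k L ih =>
    simp only [List.foldl_cons, List.mem_cons]
    rw [ih, PySem.Dict.getD_insert]
    by_cases hbL : b ∈ L <;> by_cases hbk : b = k <;> simp [hbL, hbk]

-- sorting commutes with filtering (stability: the sorted filter is the filter of the sorted list)
theorem sorted_filter (l : List String) (q : String → Bool) :
    PySem.List.sorted (l.filter q) (fun x : String => x) false
      = (PySem.List.sorted l (fun x : String => x) false).filter q := by
  apply PySem.List.sorted_id_eq_of_perm_of_pairwise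
  · exact (PySem.List.sorted_perm l (fun x : String => x) false).filter q
  · exact List.Pairwise.filter q (PySem.List.sorted_pairwise l (fun x : String => x))

-- ===== VERDICT (by name: the statement is the Claim_ definition above) =====
theorem group_parts_py_spec : Claim_equal_group_parts_py := by
  intro l _
  unfold Spec_group_parts_py group_parts_py group_parts_py_alt
  simp only [PySem.List.dedup_eq_ofList]
  set K : List String := PySem.Set.ofList (l.map pyBase) with hK
  set s : List String := PySem.List.sorted l (fun x => x) false with hs
  have hKnd : K.Nodup := PySem.Set.nodup_ofList _
  -- the A-side dict
  set dA := l.foldl (fun d p => d.modify (pyBase p) ([] : List String) (fun ps => ps ++ [p]))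
      (PySem.Dict.empty : PySem.Dict String (List String)) with hdA
  have hkeysA : dA.keys = K := by
    rw [hdA, PySem.Dict.keys_foldl_modify_key]
    simp only [PySem.Dict.keys_empty, PySem.Set.update_nil_left]
    exact hK.symm
  -- the B-side seeded dict
  set d0 := K.foldl (fun d b => d.insert b ([] : List String))
      (PySem.Dict.empty : PySem.Dict String (List String)) with hd0
  have hkeys0 : d0.keys = K := by
    rw [hd0, PySem.Dict.keys_foldl_insert]
    simp only [PySem.Dict.keys_empty, PySem.Set.update_nil_left]
    exact PySem.Set.ofList_eq_self_of_nodup K hKnd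
  set dB := s.foldl (fun d p => d.modify (pyBase p) ([] : List String) (fun ps => ps ++ [p])) d0
    with hdB
  have hmemK : ∀ x ∈ s.map pyBase, x ∈ K := by
    intro x hx
    rcases List.mem_map.mp hx with ⟨p, hp, rfl⟩
    have hpl : p ∈ l := (PySem.List.mem_sorted l (fun x => x) false p).mp hp
    exact (PySem.Set.mem_ofList _ _).mpr (List.mem_map.mpr ⟨p, hpl, rfl⟩)
  have hkeysB : dB.keys = K := by
    rw [hdB, PySem.Dict.keys_foldl_modify_key, hkeys0, PySem.Set.update_eq_append_filter]
    rw [List.filter_eq_nil_iff.mpr ?_, List.append_nil]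
    intro y hy
    have hyK : y ∈ K := hmemK y ((PySem.Set.mem_ofList _ _).mp hy)
    simpa using hyK
  have hndB : dB.keys.Nodup := hkeysB ▸ hKnd
  have hndA : dA.keys.Nodup := hkeysA ▸ hKnd
  -- values
  have hvalA : ∀ b, dA.getD b [] = l.filter (fun p => pyBase p == b) := by
    intro b; rw [hdA, getD_group_fold]; simp
  have hvalB : ∀ b, dB.getD b [] = s.filter (fun p => pyBase p == b) := by
    intro b
    rw [hdB, getD_group_fold, hd0, getD_seed_fold]
    by_cases hb : b ∈ K <;> simp [hb]
  rw [PySem.Dict.items_eq_map_keys dA hndA ([] : List String),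
      PySem.Dict.items_eq_map_keys dB hndB ([] : List String),
      hkeysA, hkeysB, List.map_map]
  apply List.map_congr_left
  intro b _
  simp only [Function.comp_apply, hvalA, hvalB]
  exact congrArg (fun v => (b, v)) (by rw [sorted_filter, hs])
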